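-- pv_equiv track=rewrite | github.com/cianc/AoC2025 | day09.py | red_and_green_edge_tiles
-- ===== SOURCE A (Python) =====
-- import copy
-- from typing import List, Tuple, Dict, Set
--
-- def red_and_green_edge_tiles(red_tiles: List[Tuple[int, int]]) -> List[Tuple[int, int]]:
--     red_and_green_tiles = copy.deepcopy(red_tiles)
--
--     for tile in red_tiles:
--         tile_x, tile_y = tile
--         for other_tile in red_tiles:
--             if tile == other_tile:
--                 continue
--             other_tile_x, other_tile_y = other_tile
--
--             if other_tile_y == tile_y:
--                 start_x, end_x = sorted([tile_x, other_tile_x])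
--                 red_and_green_tiles.extend((offset, tile_y) for offset in range(start_x+1, end_x))
--
--
--             if other_tile_x == tile_x:
--                 start_y, end_y = sorted([tile_y, other_tile_y])
--                 red_and_green_tiles.extend((tile_x, offset) for offset in range(start_y+1, end_y))
--
--     return red_and_green_tiles
-- ===== SOURCE B (Python) =====
-- from typing import List, Tuple
--
-- def red_and_green_edge_tiles(red_tiles: List[Tuple[int, int]]) -> List[Tuple[int, int]]:
--     # Group tiles by row and by column (distinct coordinates, first-occurrence order).
--     rows = {}  # y -> distinct x's of red tiles in that row
--     cols = {}  # x -> distinct y's of red tiles in that column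
--     for x, y in red_tiles:
--         rxs = rows.setdefault(y, [])
--         if x not in rxs:
--             rxs.append(x)
--         cys = cols.setdefault(x, [])
--         if y not in cys:
--             cys.append(y)
--     # Each tile o contributes, to every partner tile t in its row/column, the
--     # strictly-between segment; adj[t] collects contributions in contributor order.
--     adj = {}
--     for ox, oy in red_tiles:
--         for x in rows[oy]:
--             if x != ox:
--                 lo, hi = (x, ox) if x < ox else (ox, x)
--                 adj.setdefault((x, oy), []).extend((off, oy) for off in range(lo + 1, hi))
--         for y in cols[ox]:
--             if y != oy:
--                 lo, hi = (y, oy) if y < oy else (oy, y)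
--                 adj.setdefault((ox, y), []).extend((ox, off) for off in range(lo + 1, hi))
--     out = list(red_tiles)
--     for t in red_tiles:
--         out.extend(adj.get(t, []))
--     return out
-- ===== Notes on version B (the rewrite author's own statement) =====
-- stated objective: faster
-- what changed: B replaces A's all-pairs double scan with row/column hash grouping: tiles are bucketed by y and by x once, each tile then contributes its between-segments only to the tiles actually sharing its row or column, and the output is reassembled per outer tile in A's exact order.
import Mathlib
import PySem

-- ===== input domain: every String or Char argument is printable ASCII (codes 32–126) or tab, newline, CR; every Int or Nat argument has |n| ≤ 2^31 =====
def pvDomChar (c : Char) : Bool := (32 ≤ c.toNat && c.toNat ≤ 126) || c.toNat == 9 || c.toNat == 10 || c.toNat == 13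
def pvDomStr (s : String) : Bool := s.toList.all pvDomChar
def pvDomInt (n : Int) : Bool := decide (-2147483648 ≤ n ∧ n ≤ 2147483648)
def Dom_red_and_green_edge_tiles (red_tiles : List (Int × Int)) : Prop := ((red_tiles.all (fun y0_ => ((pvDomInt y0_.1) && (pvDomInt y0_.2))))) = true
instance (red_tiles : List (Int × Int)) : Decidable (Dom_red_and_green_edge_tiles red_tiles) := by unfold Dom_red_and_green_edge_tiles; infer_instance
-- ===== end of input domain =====

-- B replaces A's all-pairs double scan by row/column grouping dicts, so each tile
-- contributes between-segments only to tiles actually sharing its row or column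
-- (objective: faster, O(n + contributing_pairs + output) vs A's O(n^2 + output)).


-- ===== PORT A =====
def red_and_green_edge_tiles (red_tiles : List (Int × Int)) : List (Int × Int) :=
  red_tiles.foldl (fun acc tile =>
    red_tiles.foldl (fun acc other =>
      if other = tile then acc
      else
        let acc1 := if other.2 = tile.2 then
            let p := if tile.1 ≤ other.1 then (tile.1, other.1) else (other.1, tile.1)
            acc ++ (PySem.List.pyRange (p.1 + 1) p.2 1).map (fun off => (off, tile.2))
          else acc
        if other.1 = tile.1 then
            let p := if tile.2 ≤ other.2 then (tile.2, other.2) else (other.2, tile.2)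
            acc1 ++ (PySem.List.pyRange (p.1 + 1) p.2 1).map (fun off => (tile.1, off))
          else acc1) acc) red_tiles

-- ===== PORT B =====
-- B-side helpers: each Python loop body of Source B as a named step function.
-- body of the grouping loop: record t.1 among its row's x's and t.2 among its column's y's
def pvGStep (rc : PySem.Dict Int (List Int) × PySem.Dict Int (List Int)) (t : Int × Int) :
    PySem.Dict Int (List Int) × PySem.Dict Int (List Int) :=
  let rxs := rc.1.getD t.2 []
  let rows := if t.1 ∈ rxs then rc.1 else rc.1.insert t.2 (rxs ++ [t.1])
  let cys := rc.2.getD t.1 []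
  let cols := if t.2 ∈ cys then rc.2 else rc.2.insert t.1 (cys ++ [t.2])
  (rows, cols)

-- rows: y -> distinct x's; cols: x -> distinct y's (first-occurrence order)
def pvGroups (red_tiles : List (Int × Int)) :
    PySem.Dict Int (List Int) × PySem.Dict Int (List Int) :=
  red_tiles.foldl pvGStep (PySem.Dict.empty, PySem.Dict.empty)

-- horizontal segment strictly between x and o.1, in row o.2
def pvRSeg (o : Int × Int) (x : Int) : List (Int × Int) :=
  let p := if x < o.1 then (x, o.1) else (o.1, x)
  (PySem.List.pyRange (p.1 + 1) p.2 1).map (fun off => (off, o.2))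

-- vertical segment strictly between y and o.2, in column o.1
def pvCSeg (o : Int × Int) (y : Int) : List (Int × Int) :=
  let p := if y < o.2 then (y, o.2) else (o.2, y)
  (PySem.List.pyRange (p.1 + 1) p.2 1).map (fun off => (o.1, off))

def pvRowStep (o : Int × Int) (adj : PySem.Dict (Int × Int) (List (Int × Int))) (x : Int) :
    PySem.Dict (Int × Int) (List (Int × Int)) :=
  if x ≠ o.1 then adj.insert (x, o.2) (adj.getD (x, o.2) [] ++ pvRSeg o x) else adj

def pvColStep (o : Int × Int) (adj : PySem.Dict (Int × Int) (List (Int × Int))) (y : Int) :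
    PySem.Dict (Int × Int) (List (Int × Int)) :=
  if y ≠ o.2 then adj.insert (o.1, y) (adj.getD (o.1, y) [] ++ pvCSeg o y) else adj

-- body of the contribution loop: o contributes segments to all partners in its row and column
def pvAdjStep (rows cols : PySem.Dict Int (List Int))
    (adj : PySem.Dict (Int × Int) (List (Int × Int))) (o : Int × Int) :
    PySem.Dict (Int × Int) (List (Int × Int)) :=
  (cols.getD o.1 []).foldl (pvColStep o) ((rows.getD o.2 []).foldl (pvRowStep o) adj)

-- adj[t]: green tiles contributed to partner t, in contributor order
def pvAdj (rows cols : PySem.Dict Int (List Int)) (red_tiles : List (Int × Int)) :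
    PySem.Dict (Int × Int) (List (Int × Int)) :=
  red_tiles.foldl (pvAdjStep rows cols) PySem.Dict.empty

def red_and_green_edge_tiles_alt (red_tiles : List (Int × Int)) : List (Int × Int) :=
  let grp := pvGroups red_tiles
  let adj := pvAdj grp.1 grp.2 red_tiles
  red_tiles.foldl (fun out t => out ++ adj.getD t []) red_tiles

-- ===== PRECONDITION & SPEC =====
def Spec_red_and_green_edge_tiles (red_tiles : List (Int × Int)) (out : List (Int × Int)) : Prop := out = red_and_green_edge_tiles_alt red_tiles
instance (red_tiles : List (Int × Int)) (out : List (Int × Int)) : Decidable (Spec_red_and_green_edge_tiles red_tiles out) := by unfold Spec_red_and_green_edge_tiles; infer_instance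

-- ===== CLAIM (what is proved, stated in full; the proofs are below) =====
def Claim_equal_red_and_green_edge_tiles : Prop := ∀ (red_tiles : List (Int × Int)), Dom_red_and_green_edge_tiles red_tiles → Spec_red_and_green_edge_tiles red_tiles (red_and_green_edge_tiles red_tiles)

-- ===== LEMMAS AND PROOFS =====

-- the contribution of inner tile `o` to outer tile `t` in A's loop body
def pvF (t o : Int × Int) : List (Int × Int) :=
  if o = t then []
  else
    (if o.2 = t.2 then
        let p := if t.1 ≤ o.1 then (t.1, o.1) else (o.1, t.1)
        (PySem.List.pyRange (p.1 + 1) p.2 1).map (fun off => (off, t.2))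
      else []) ++
    (if o.1 = t.1 then
        let p := if t.2 ≤ o.2 then (t.2, o.2) else (o.2, t.2)
        (PySem.List.pyRange (p.1 + 1) p.2 1).map (fun off => (t.1, off))
      else [])

-- the contribution of contributor `o` to key `t` in B's adj-building loop
def pvG (rows cols : PySem.Dict Int (List Int)) (o t : Int × Int) : List (Int × Int) :=
  (if t.2 = o.2 ∧ t.1 ∈ rows.getD o.2 [] ∧ t.1 ≠ o.1 then pvRSeg o t.1 else []) ++
  (if t.1 = o.1 ∧ t.2 ∈ cols.getD o.1 [] ∧ t.2 ≠ o.2 then pvCSeg o t.2 else [])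

-- membership in the row dict = membership of the tile in the processed list
theorem pvGroups_rows_mem (l : List (Int × Int))
    (rc : PySem.Dict Int (List Int) × PySem.Dict Int (List Int)) (x y : Int) :
    x ∈ (l.foldl pvGStep rc).1.getD y [] ↔ x ∈ rc.1.getD y [] ∨ (x, y) ∈ l := by
  induction l generalizing rc with
  | nil => simp
  | cons a l ih =>
    obtain ⟨a1, a2⟩ := a
    rw [List.foldl_cons, ih]
    have hstep : x ∈ (pvGStep rc (a1, a2)).1.getD y [] ↔
        x ∈ rc.1.getD y [] ∨ (x = a1 ∧ y = a2) := by
      simp only [pvGStep]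
      by_cases hm : a1 ∈ rc.1.getD a2 []
      · simp only [if_pos hm]
        constructor
        · tauto
        · rintro (h | ⟨rfl, rfl⟩)
          · exact h
          · exact hm
      · simp only [if_neg hm, PySem.Dict.getD_insert]
        by_cases hy : y = a2
        · subst hy
          simp
        · simp [hy]
    rw [hstep]
    simp only [List.mem_cons, Prod.mk.injEq]
    tauto

-- membership in the column dict = membership of the tile in the processed list
theorem pvGroups_cols_mem (l : List (Int × Int))
    (rc : PySem.Dict Int (List Int) × PySem.Dict Int (List Int)) (x y : Int) :
    y ∈ (l.foldl pvGStep rc).2.getD x [] ↔ y ∈ rc.2.getD x [] ∨ (x, y) ∈ l := by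
  induction l generalizing rc with
  | nil => simp
  | cons a l ih =>
    obtain ⟨a1, a2⟩ := a
    rw [List.foldl_cons, ih]
    have hstep : y ∈ (pvGStep rc (a1, a2)).2.getD x [] ↔
        y ∈ rc.2.getD x [] ∨ (x = a1 ∧ y = a2) := by
      simp only [pvGStep]
      by_cases hm : a2 ∈ rc.2.getD a1 []
      · simp only [if_pos hm]
        constructor
        · tauto
        · rintro (h | ⟨rfl, rfl⟩)
          · exact h
          · exact hm
      · simp only [if_neg hm, PySem.Dict.getD_insert]
        by_cases hx : x = a1
        · subst hx
          simp
        · simp [hx]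
    rw [hstep]
    simp only [List.mem_cons, Prod.mk.injEq]
    tauto

-- the per-row / per-column lists stay duplicate-free
theorem pvGroups_nodup (l : List (Int × Int))
    (rc : PySem.Dict Int (List Int) × PySem.Dict Int (List Int))
    (hr : ∀ y, (rc.1.getD y []).Nodup) (hc : ∀ x, (rc.2.getD x []).Nodup) :
    (∀ y, ((l.foldl pvGStep rc).1.getD y []).Nodup) ∧
    (∀ x, ((l.foldl pvGStep rc).2.getD x []).Nodup) := by
  induction l generalizing rc with
  | nil => exact ⟨hr, hc⟩
  | cons a l ih =>
    obtain ⟨a1, a2⟩ := a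
    rw [List.foldl_cons]
    refine ih _ ?_ ?_
    · intro y
      simp only [pvGStep]
      by_cases hm : a1 ∈ rc.1.getD a2 []
      · simpa [if_pos hm] using hr y
      · simp only [if_neg hm, PySem.Dict.getD_insert]
        by_cases hy : y = a2
        · subst hy
          simp only [if_true]
          refine List.Nodup.append (hr _) (List.nodup_singleton _) ?_
          intro z hz hz'
          rw [List.mem_singleton] at hz'
          subst hz'
          exact hm hz
        · simpa [if_neg hy] using hr y
    · intro x
      simp only [pvGStep]
      by_cases hm : a2 ∈ rc.2.getD a1 []
      · simpa [if_pos hm] using hc x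
      · simp only [if_neg hm, PySem.Dict.getD_insert]
        by_cases hx : x = a1
        · subst hx
          simp only [if_true]
          refine List.Nodup.append (hc _) (List.nodup_singleton _) ?_
          intro z hz hz'
          rw [List.mem_singleton] at hz'
          subst hz'
          exact hm hz
        · simpa [if_neg hx] using hc x

-- effect of the row inner loop on one key
theorem pvRowStep_fold_getD (o : Int × Int) (xs : List Int) (hnd : xs.Nodup)
    (adj : PySem.Dict (Int × Int) (List (Int × Int))) (t : Int × Int) :
    (xs.foldl (pvRowStep o) adj).getD t [] =
      adj.getD t [] ++ (if t.2 = o.2 ∧ t.1 ∈ xs ∧ t.1 ≠ o.1 then pvRSeg o t.1 else []) := by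
  induction xs generalizing adj with
  | nil => simp
  | cons x xs ih =>
    have hx : x ∉ xs := (List.nodup_cons.mp hnd).1
    have hnd' : xs.Nodup := (List.nodup_cons.mp hnd).2
    rw [List.foldl_cons, ih hnd']
    simp only [pvRowStep]
    by_cases hxo : x = o.1
    · simp only [if_neg (show ¬(x ≠ o.1) from fun h => h hxo)]
      congr 1
      by_cases hc : t.2 = o.2 ∧ t.1 ∈ xs ∧ t.1 ≠ o.1
      · rw [if_pos hc, if_pos ⟨hc.1, List.mem_cons_of_mem _ hc.2.1, hc.2.2⟩]
      · rw [if_neg hc, if_neg]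
        rintro ⟨h1, h2, h3⟩
        rcases List.mem_cons.mp h2 with h | h
        · exact h3 (h.trans hxo)
        · exact hc ⟨h1, h, h3⟩
    · simp only [if_pos hxo]
      by_cases ht : t = (x, o.2)
      · subst ht
        rw [PySem.Dict.getD_insert, if_pos rfl, if_neg (fun h => hx h.2.1),
          if_pos ⟨rfl, List.mem_cons_self, hxo⟩, List.append_nil]
      · rw [PySem.Dict.getD_insert, if_neg ht]
        congr 1
        by_cases hc : t.2 = o.2 ∧ t.1 ∈ xs ∧ t.1 ≠ o.1
        · rw [if_pos hc, if_pos ⟨hc.1, List.mem_cons_of_mem _ hc.2.1, hc.2.2⟩]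
        · rw [if_neg hc, if_neg]
          rintro ⟨h1, h2, h3⟩
          rcases List.mem_cons.mp h2 with h | h
          · exact ht (Prod.ext h h1)
          · exact hc ⟨h1, h, h3⟩

-- effect of the column inner loop on one key
theorem pvColStep_fold_getD (o : Int × Int) (ys : List Int) (hnd : ys.Nodup)
    (adj : PySem.Dict (Int × Int) (List (Int × Int))) (t : Int × Int) :
    (ys.foldl (pvColStep o) adj).getD t [] =
      adj.getD t [] ++ (if t.1 = o.1 ∧ t.2 ∈ ys ∧ t.2 ≠ o.2 then pvCSeg o t.2 else []) := by
  induction ys generalizing adj with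
  | nil => simp
  | cons y ys ih =>
    have hy : y ∉ ys := (List.nodup_cons.mp hnd).1
    have hnd' : ys.Nodup := (List.nodup_cons.mp hnd).2
    rw [List.foldl_cons, ih hnd']
    simp only [pvColStep]
    by_cases hyo : y = o.2
    · simp only [if_neg (show ¬(y ≠ o.2) from fun h => h hyo)]
      congr 1
      by_cases hc : t.1 = o.1 ∧ t.2 ∈ ys ∧ t.2 ≠ o.2
      · rw [if_pos hc, if_pos ⟨hc.1, List.mem_cons_of_mem _ hc.2.1, hc.2.2⟩]
      · rw [if_neg hc, if_neg]
        rintro ⟨h1, h2, h3⟩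
        rcases List.mem_cons.mp h2 with h | h
        · exact h3 (h.trans hyo)
        · exact hc ⟨h1, h, h3⟩
    · simp only [if_pos hyo]
      by_cases ht : t = (o.1, y)
      · subst ht
        rw [PySem.Dict.getD_insert, if_pos rfl, if_neg (fun h => hy h.2.1),
          if_pos ⟨rfl, List.mem_cons_self, hyo⟩, List.append_nil]
      · rw [PySem.Dict.getD_insert, if_neg ht]
        congr 1
        by_cases hc : t.1 = o.1 ∧ t.2 ∈ ys ∧ t.2 ≠ o.2
        · rw [if_pos hc, if_pos ⟨hc.1, List.mem_cons_of_mem _ hc.2.1, hc.2.2⟩]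
        · rw [if_neg hc, if_neg]
          rintro ⟨h1, h2, h3⟩
          rcases List.mem_cons.mp h2 with h | h
          · exact ht (Prod.ext h1 h)
          · exact hc ⟨h1, h, h3⟩

-- the adj fold on one key is the concatenation of per-contributor contributions
theorem pvAdj_fold_getD (rows cols : PySem.Dict Int (List Int))
    (hr : ∀ y, (rows.getD y []).Nodup) (hc : ∀ x, (cols.getD x []).Nodup)
    (l : List (Int × Int)) (adj : PySem.Dict (Int × Int) (List (Int × Int))) (t : Int × Int) :
    (l.foldl (pvAdjStep rows cols) adj).getD t [] =
      adj.getD t [] ++ l.flatMap (fun o => pvG rows cols o t) := by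
  induction l generalizing adj with
  | nil => simp
  | cons o l ih =>
    rw [List.foldl_cons, ih]
    have hstep : (pvAdjStep rows cols adj o).getD t [] =
        adj.getD t [] ++ pvG rows cols o t := by
      rw [pvAdjStep, pvColStep_fold_getD o _ (hc o.1), pvRowStep_fold_getD o _ (hr o.2), pvG,
        List.append_assoc]
    rw [hstep, List.flatMap_cons, List.append_assoc]

-- for a tile of the input, B's per-contributor contribution is A's segment function
theorem pvG_eq_pvF (rt : List (Int × Int)) (t : Int × Int) (htm : t ∈ rt) (o : Int × Int) :
    pvG (pvGroups rt).1 (pvGroups rt).2 o t = pvF t o := by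
  have hrow : t.2 = o.2 → (t.1 ∈ (pvGroups rt).1.getD o.2 []) := by
    intro h
    rw [pvGroups, pvGroups_rows_mem]
    right
    rw [← h]
    exact htm
  have hcol : t.1 = o.1 → (t.2 ∈ (pvGroups rt).2.getD o.1 []) := by
    intro h
    rw [pvGroups, pvGroups_cols_mem]
    right
    rw [← h]
    exact htm
  rw [pvG, pvF]
  by_cases hot : o = t
  · subst hot
    rw [if_pos rfl, if_neg (by tauto), if_neg (by tauto), List.append_nil]
  · rw [if_neg hot]
    by_cases h2 : o.2 = t.2
    · have h1 : o.1 ≠ t.1 := fun h1 => hot (Prod.ext h1 h2)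
      rw [if_pos ⟨h2.symm, hrow h2.symm, fun h => h1 h.symm⟩,
        if_neg (fun hcon => h1 hcon.1.symm),
        if_pos h2, if_neg h1, List.append_nil, List.append_nil, pvRSeg]
      have hne : t.1 ≠ o.1 := fun h => h1 h.symm
      rcases lt_trichotomy t.1 o.1 with hlt | heq | hgt
      · rw [if_pos hlt, if_pos (le_of_lt hlt)]
        simp [h2]
      · exact absurd heq hne
      · rw [if_neg (by omega), if_neg (by omega)]
        simp [h2]
    · by_cases h1 : o.1 = t.1
      · rw [if_neg (fun hcon => h2 hcon.1.symm),
          if_pos ⟨h1.symm, hcol h1.symm, fun h => h2 h.symm⟩,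
          if_neg h2, if_pos h1, List.nil_append, List.nil_append, pvCSeg]
        have hne : t.2 ≠ o.2 := fun h => h2 h.symm
        rcases lt_trichotomy t.2 o.2 with hlt | heq | hgt
        · rw [if_pos hlt, if_pos (le_of_lt hlt)]
          simp [h1]
        · exact absurd heq hne
        · rw [if_neg (by omega), if_neg (by omega)]
          simp [h1]
      · rw [if_neg (fun hcon => h2 hcon.1.symm), if_neg (fun hcon => h1 hcon.1.symm),
          if_neg h2, if_neg h1]

-- A's inner loop appends the flatMap of pvF
theorem pvA_inner (tile : Int × Int) (l : List (Int × Int)) (acc : List (Int × Int)) :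
    l.foldl (fun acc other =>
      if other = tile then acc
      else
        let acc1 := if other.2 = tile.2 then
            let p := if tile.1 ≤ other.1 then (tile.1, other.1) else (other.1, tile.1)
            acc ++ (PySem.List.pyRange (p.1 + 1) p.2 1).map (fun off => (off, tile.2))
          else acc
        if other.1 = tile.1 then
            let p := if tile.2 ≤ other.2 then (tile.2, other.2) else (other.2, tile.2)
            acc1 ++ (PySem.List.pyRange (p.1 + 1) p.2 1).map (fun off => (tile.1, off))
          else acc1) acc
    = acc ++ l.flatMap (pvF tile) := by
  induction l generalizing acc with
  | nil => simp
  | cons o l ih =>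
    rw [List.foldl_cons, ih, List.flatMap_cons, ← List.append_assoc]
    congr 1
    by_cases h0 : o = tile
    · simp [pvF, h0]
    · simp only [pvF, if_neg h0]
      by_cases h2 : o.2 = tile.2 <;> by_cases h1 : o.1 = tile.1 <;>
        simp [h1, h2]

-- A's result is the input followed by the double flatMap of pvF
theorem pvA_shape (rt : List (Int × Int)) (l : List (Int × Int)) (acc : List (Int × Int)) :
    l.foldl (fun acc tile =>
      rt.foldl (fun acc other =>
        if other = tile then acc
        else
          let acc1 := if other.2 = tile.2 then
              let p := if tile.1 ≤ other.1 then (tile.1, other.1) else (other.1, tile.1)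
              acc ++ (PySem.List.pyRange (p.1 + 1) p.2 1).map (fun off => (off, tile.2))
            else acc
          if other.1 = tile.1 then
              let p := if tile.2 ≤ other.2 then (tile.2, other.2) else (other.2, tile.2)
              acc1 ++ (PySem.List.pyRange (p.1 + 1) p.2 1).map (fun off => (tile.1, off))
            else acc1) acc) acc
    = acc ++ l.flatMap (fun t => rt.flatMap (pvF t)) := by
  induction l generalizing acc with
  | nil => simp
  | cons t l ih =>
    rw [List.foldl_cons, pvA_inner, ih, List.flatMap_cons, List.append_assoc]

theorem pv_flatMap_congr {α β : Type} (l : List α) (f g : α → List β)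
    (h : ∀ x ∈ l, f x = g x) : l.flatMap f = l.flatMap g := by
  induction l with
  | nil => rfl
  | cons a l ih =>
    rw [List.flatMap_cons, List.flatMap_cons, h a List.mem_cons_self,
      ih (fun x hx => h x (List.mem_cons_of_mem _ hx))]

-- ===== VERDICT (by name: the statement is the Claim_ definition above) =====
theorem red_and_green_edge_tiles_spec : Claim_equal_red_and_green_edge_tiles := by
  intro rt _
  show red_and_green_edge_tiles rt = red_and_green_edge_tiles_alt rt
  have hnd : (∀ y, ((pvGroups rt).1.getD y []).Nodup) ∧
      (∀ x, ((pvGroups rt).2.getD x []).Nodup) := by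
    unfold pvGroups
    exact pvGroups_nodup rt (PySem.Dict.empty, PySem.Dict.empty) (by simp) (by simp)
  rw [red_and_green_edge_tiles, pvA_shape]
  simp only [red_and_green_edge_tiles_alt]
  rw [PySem.List.foldl_append_eq_flatMap]
  congr 1
  apply pv_flatMap_congr
  intro t htm
  rw [pvAdj, pvAdj_fold_getD _ _ hnd.1 hnd.2, PySem.Dict.getD_empty, List.nil_append]
  exact (pv_flatMap_congr _ _ _ (fun o _ => pvG_eq_pvF rt t htm o)).symm
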